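-- pv_equiv track=rewrite | github.com/eriknyquist/text_game_maker | text_game_maker/builder/map_builder.py | _get_command_delimiter
-- ===== SOURCE A (Python) =====
-- COMMAND_DELIMITERS = [',', ';', '/', '\\']
--
-- def _get_command_delimiter(action):
--     for i in COMMAND_DELIMITERS:
--         if i in action:
--             for j in COMMAND_DELIMITERS:
--                 if j != i and j in action:
--                     return None
--
--             return i
--
--     return None
-- ===== SOURCE B (Python) =====
-- COMMAND_DELIMITERS = [',', ';', '/', '\\']
--
-- def _get_command_delimiter(action):
--     # single pass over the characters of action, tracking the first delimiter seen
--     found = None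
--     for ch in action:
--         if ch in COMMAND_DELIMITERS:
--             if found is None:
--                 found = ch
--             elif ch != found:
--                 return None
--     return found
-- ===== Notes on version B (the rewrite author's own statement) =====
-- stated objective: alternative
-- what changed: A scans the fixed delimiter list and rescans it with substring tests for each hit; B instead traverses the characters of action once with an accumulator holding the first delimiter char seen, returning None on a second distinct one.
import Mathlib
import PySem

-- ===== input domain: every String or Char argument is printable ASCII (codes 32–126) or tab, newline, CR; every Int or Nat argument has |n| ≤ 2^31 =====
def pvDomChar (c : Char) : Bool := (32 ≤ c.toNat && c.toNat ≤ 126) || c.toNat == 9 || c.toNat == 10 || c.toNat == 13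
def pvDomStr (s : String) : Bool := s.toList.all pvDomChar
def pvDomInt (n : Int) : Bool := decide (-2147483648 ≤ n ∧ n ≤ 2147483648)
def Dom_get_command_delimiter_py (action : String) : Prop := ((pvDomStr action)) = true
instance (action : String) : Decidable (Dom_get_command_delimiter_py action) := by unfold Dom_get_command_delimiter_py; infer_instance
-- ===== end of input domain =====

-- B replaces A's delimiter-list scan with nested substring rescans by ONE pass over the
-- characters of action holding the first delimiter char seen (alternative decomposition).

-- ===== PORT A =====
def pvDelims : List String := [",", ";", "/", "\\"]

-- inner 'for j in COMMAND_DELIMITERS: if j != i and j in action: return None; ...; return i'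
def pvInnerA (action i : String) : List String → Option String
  | [] => some i
  | j :: rest => if j ≠ i ∧ PySem.Str.isIn j action then none else pvInnerA action i rest

-- outer 'for i in COMMAND_DELIMITERS: if i in action: <inner>; ...; return None'
def pvOuterA (action : String) : List String → Option String
  | [] => none
  | i :: rest => if PySem.Str.isIn i action then pvInnerA action i pvDelims else pvOuterA action rest

def get_command_delimiter_py (action : String) : Option String := pvOuterA action pvDelims

-- ===== PORT B =====
def pvDelimChars : List Char := [',', ';', '/', '\\']

-- 'for ch in action: if ch in COMMAND_DELIMITERS: ...' with accumulator found
def pvScanB (found : Option Char) : List Char → Option Char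
  | [] => found
  | ch :: rest =>
    if ch ∈ pvDelimChars then
      match found with
      | none => pvScanB (some ch) rest
      | some f => if ch ≠ f then none else pvScanB (some f) rest
    else pvScanB found rest

def get_command_delimiter_py_alt (action : String) : Option String :=
  (pvScanB none action.toList).map (fun c => String.ofList [c])

-- ===== PRECONDITION & SPEC =====
def Spec_get_command_delimiter_py (action : String) (out : Option String) : Prop := out = get_command_delimiter_py_alt action
instance (action : String) (out : Option String) : Decidable (Spec_get_command_delimiter_py action out) := by unfold Spec_get_command_delimiter_py; infer_instance

-- ===== CLAIM =====
def Claim_equal_get_command_delimiter_py : Prop := ∀ (action : String), Dom_get_command_delimiter_py action → Spec_get_command_delimiter_py action (get_command_delimiter_py action)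

-- ===== LEMMAS AND PROOFS =====

-- with accumulator some f, the scan returns some f iff every delimiter char remaining equals f
theorem pvScanB_some (f : Char) (l : List Char) :
    pvScanB (some f) l = if ∀ c ∈ l, c ∈ pvDelimChars → c = f then some f else none := by
  induction l with
  | nil => simp [pvScanB]
  | cons ch rest ih =>
    by_cases hd : ch ∈ pvDelimChars
    · by_cases he : ch = f
      · subst he; simp [pvScanB, hd, ih]
      · have hnall : ¬ (∀ c ∈ ch :: rest, c ∈ pvDelimChars → c = f) :=
          fun h => he (h ch (by simp) hd)
        rw [if_neg hnall]
        simp [pvScanB, hd, he]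
    · simp only [pvScanB, if_neg hd, ih]
      congr 1
      simp only [eq_iff_iff]
      constructor
      · intro h c hc hcd
        rcases List.mem_cons.mp hc with rfl | hc'
        · exact absurd hcd hd
        · exact h c hc' hcd
      · intro h c hc hcd; exact h c (List.mem_cons_of_mem _ hc) hcd

-- scan with empty accumulator: no delimiter char → none
theorem pvScanB_none_empty (l : List Char) (h : ∀ c ∈ l, c ∉ pvDelimChars) :
    pvScanB none l = none := by
  induction l with
  | nil => rfl
  | cons ch rest ih =>
    have hd : ch ∉ pvDelimChars := h ch (by simp)
    simp only [pvScanB, if_neg hd]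
    exact ih fun c hc => h c (List.mem_cons_of_mem _ hc)

-- scan with empty accumulator: d present and every delimiter char equals d → some d
theorem pvScanB_none_one (l : List Char) (d : Char) (hd : d ∈ pvDelimChars) (hin : d ∈ l)
    (huniq : ∀ c ∈ l, c ∈ pvDelimChars → c = d) :
    pvScanB none l = some d := by
  induction l with
  | nil => simp at hin
  | cons ch rest ih =>
    by_cases hcd : ch ∈ pvDelimChars
    · have : ch = d := huniq ch (by simp) hcd
      subst this
      simp only [pvScanB, if_pos hcd, pvScanB_some]
      rw [if_pos fun c hc h => huniq c (List.mem_cons_of_mem _ hc) h]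
    · simp only [pvScanB, if_neg hcd]
      have hin' : d ∈ rest := by
        rcases List.mem_cons.mp hin with rfl | h
        · exact absurd hd hcd
        · exact h
      exact ih hin' fun c hc h => huniq c (List.mem_cons_of_mem _ hc) h

-- scan with empty accumulator: two distinct delimiter chars present → none
theorem pvScanB_none_two (l : List Char) (a b : Char) (ha : a ∈ pvDelimChars)
    (hb : b ∈ pvDelimChars) (hal : a ∈ l) (hbl : b ∈ l) (hab : a ≠ b) :
    pvScanB none l = none := by
  induction l with
  | nil => simp at hal
  | cons ch rest ih =>
    by_cases hcd : ch ∈ pvDelimChars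
    · simp only [pvScanB, if_pos hcd, pvScanB_some]
      rw [if_neg]
      intro hall
      have h1 : a ∈ ch :: rest → a = ch := by
        intro h; rcases List.mem_cons.mp h with rfl | h' <;> [rfl; exact hall a h' ha]
      have h2 : b ∈ ch :: rest → b = ch := by
        intro h; rcases List.mem_cons.mp h with rfl | h' <;> [rfl; exact hall b h' hb]
      exact hab ((h1 hal).trans (h2 hbl).symm)
    · simp only [pvScanB, if_neg hcd]
      have hal' : a ∈ rest := by
        rcases List.mem_cons.mp hal with rfl | h
        exacts [absurd ha hcd, h]
      have hbl' : b ∈ rest := by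
        rcases List.mem_cons.mp hbl with rfl | h
        exacts [absurd hb hcd, h]
      exact ih hal' hbl'

-- single-char substring membership is List membership
theorem chars_isIn_single (c : Char) (l : List Char) :
    PySem.Chars.isIn [c] l = true ↔ c ∈ l := by
  rw [PySem.Chars.isIn_iff_infix]
  constructor
  · intro h; exact h.subset (by simp)
  · intro h
    rcases List.append_of_mem h with ⟨p, q, hpq⟩
    exact ⟨p, q, by simp [hpq]⟩

-- ===== VERDICT =====
theorem get_command_delimiter_py_spec : Claim_equal_get_command_delimiter_py := by
  intro action _
  unfold Spec_get_command_delimiter_py get_command_delimiter_py get_command_delimiter_py_alt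
  by_cases h1 : (',' : Char) ∈ action.toList
  · by_cases h2 : (';' : Char) ∈ action.toList
    · by_cases h3 : ('/' : Char) ∈ action.toList
      · by_cases h4 : ('\\' : Char) ∈ action.toList
        · rw [pvScanB_none_two action.toList ',' ';' (by decide) (by decide) h1 h2 (by decide)]
          simp [chars_isIn_single, h1, h2, h3, h4, pvOuterA, pvInnerA, pvDelims]
        · rw [pvScanB_none_two action.toList ',' ';' (by decide) (by decide) h1 h2 (by decide)]
          simp [chars_isIn_single, h1, h2, h3, h4, pvOuterA, pvInnerA, pvDelims]
      · by_cases h4 : ('\\' : Char) ∈ action.toList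
        · rw [pvScanB_none_two action.toList ',' ';' (by decide) (by decide) h1 h2 (by decide)]
          simp [chars_isIn_single, h1, h2, h3, h4, pvOuterA, pvInnerA, pvDelims]
        · rw [pvScanB_none_two action.toList ',' ';' (by decide) (by decide) h1 h2 (by decide)]
          simp [chars_isIn_single, h1, h2, h3, h4, pvOuterA, pvInnerA, pvDelims]
    · by_cases h3 : ('/' : Char) ∈ action.toList
      · by_cases h4 : ('\\' : Char) ∈ action.toList
        · rw [pvScanB_none_two action.toList ',' '/' (by decide) (by decide) h1 h3 (by decide)]
          simp [chars_isIn_single, h1, h2, h3, h4, pvOuterA, pvInnerA, pvDelims]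
        · rw [pvScanB_none_two action.toList ',' '/' (by decide) (by decide) h1 h3 (by decide)]
          simp [chars_isIn_single, h1, h2, h3, h4, pvOuterA, pvInnerA, pvDelims]
      · by_cases h4 : ('\\' : Char) ∈ action.toList
        · rw [pvScanB_none_two action.toList ',' '\\' (by decide) (by decide) h1 h4 (by decide)]
          simp [chars_isIn_single, h1, h2, h3, h4, pvOuterA, pvInnerA, pvDelims]
        · rw [pvScanB_none_one action.toList ',' (by decide) h1 (by intro c hc hcd; fin_cases hcd <;> first | rfl | simp_all)]
          simp [chars_isIn_single, h1, h2, h3, h4, pvOuterA, pvInnerA, pvDelims]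
  · by_cases h2 : (';' : Char) ∈ action.toList
    · by_cases h3 : ('/' : Char) ∈ action.toList
      · by_cases h4 : ('\\' : Char) ∈ action.toList
        · rw [pvScanB_none_two action.toList ';' '/' (by decide) (by decide) h2 h3 (by decide)]
          simp [chars_isIn_single, h1, h2, h3, h4, pvOuterA, pvInnerA, pvDelims]
        · rw [pvScanB_none_two action.toList ';' '/' (by decide) (by decide) h2 h3 (by decide)]
          simp [chars_isIn_single, h1, h2, h3, h4, pvOuterA, pvInnerA, pvDelims]
      · by_cases h4 : ('\\' : Char) ∈ action.toList
        · rw [pvScanB_none_two action.toList ';' '\\' (by decide) (by decide) h2 h4 (by decide)]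
          simp [chars_isIn_single, h1, h2, h3, h4, pvOuterA, pvInnerA, pvDelims]
        · rw [pvScanB_none_one action.toList ';' (by decide) h2 (by intro c hc hcd; fin_cases hcd <;> first | rfl | simp_all)]
          simp [chars_isIn_single, h1, h2, h3, h4, pvOuterA, pvInnerA, pvDelims]
    · by_cases h3 : ('/' : Char) ∈ action.toList
      · by_cases h4 : ('\\' : Char) ∈ action.toList
        · rw [pvScanB_none_two action.toList '/' '\\' (by decide) (by decide) h3 h4 (by decide)]
          simp [chars_isIn_single, h1, h2, h3, h4, pvOuterA, pvInnerA, pvDelims]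
        · rw [pvScanB_none_one action.toList '/' (by decide) h3 (by intro c hc hcd; fin_cases hcd <;> first | rfl | simp_all)]
          simp [chars_isIn_single, h1, h2, h3, h4, pvOuterA, pvInnerA, pvDelims]
      · by_cases h4 : ('\\' : Char) ∈ action.toList
        · rw [pvScanB_none_one action.toList '\\' (by decide) h4 (by intro c hc hcd; fin_cases hcd <;> first | rfl | simp_all)]
          simp [chars_isIn_single, h1, h2, h3, h4, pvOuterA, pvInnerA, pvDelims]
        · rw [pvScanB_none_empty action.toList (by intro c hc hcd; fin_cases hcd <;> simp_all)]
          simp [chars_isIn_single, h1, h2, h3, h4, pvOuterA, pvInnerA, pvDelims]
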